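-- pv_equiv track=rewrite | github.com/Marshalljordanmd/Y-simulations | Y_sim_Pdrive.py | mutation
-- ===== SOURCE A (Python) =====
-- def mutation(world,mu,count): #assigns each person in the new world 'mu' additional mutations
-- 	#mu = mutation rate
-- 	#count is the unique mutation count from the function 'mutation_count'
-- 	mu_ct = count
-- 	#mu_vars = [1,2,3,4,5]
-- 	#mu = choice(mu_vars)
--
-- 	for key in world:  #this loop adds mutations to the new world population.
-- 		new_muts = []
-- 		new_list = []
--
-- 		old_muts = world[key]
--
-- 		for i in range(mu):
-- 			new_muts.append(mu_ct + 1)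
-- 			mu_ct += 1
-- 		new_list = old_muts + new_muts #the new mutations are added to the old for each male, that is each key
-- 		world[key] = new_list
--
-- 	return world
-- ===== SOURCE B (Python) =====
-- def mutation(world, mu, count):
--     # Two staged passes: first materialize the whole pool of new mutation IDs
--     # as one global range, then peel a chunk of mu IDs off its front for each
--     # key (mutates world in place, like the original).
--     keys = list(world)
--     pool = list(range(count + 1, count + mu * len(keys) + 1))
--     for key in keys:
--         chunk, pool = pool[:mu], pool[mu:]
--         world[key] = world[key] + chunk
--     return world
-- ===== Notes on version B (the rewrite author's own statement) =====
-- stated objective: alternative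
-- what changed: Instead of threading a running counter across keys and growing a per-key list with an inner append loop, B materializes the entire pool of new mutation IDs as one global range up front and then distributes it by peeling a chunk of mu IDs off the pool's front per key.
import Mathlib
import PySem

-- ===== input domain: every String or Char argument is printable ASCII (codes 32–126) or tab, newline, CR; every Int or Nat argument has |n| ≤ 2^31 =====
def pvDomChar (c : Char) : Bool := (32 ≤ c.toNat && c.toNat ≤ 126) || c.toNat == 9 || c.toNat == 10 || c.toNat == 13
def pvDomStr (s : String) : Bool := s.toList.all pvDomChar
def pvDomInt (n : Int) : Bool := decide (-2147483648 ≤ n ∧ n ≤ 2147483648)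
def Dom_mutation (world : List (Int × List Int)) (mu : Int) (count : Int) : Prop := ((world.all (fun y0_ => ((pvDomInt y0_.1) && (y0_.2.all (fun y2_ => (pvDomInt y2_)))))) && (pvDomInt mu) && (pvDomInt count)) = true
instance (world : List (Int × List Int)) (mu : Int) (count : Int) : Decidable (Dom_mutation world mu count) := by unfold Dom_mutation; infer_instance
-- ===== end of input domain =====

-- B builds the whole pool of new mutation IDs as one global range up front and peels a chunk of mu
-- off its front per key, instead of A's running counter with an inner append loop; both Pythons
-- mutate the dict in place, and the equivalence proved is about the RETURN value.


-- ===== PORT A =====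
-- the body of A's 'for key in world' loop; state = (world, mu_ct)
def mutationStepA (mu : Int) (st : PySem.Dict Int (List Int) × Int) (key : Int) :
    PySem.Dict Int (List Int) × Int :=
  let old_muts := st.1.getD key []                  -- world[key]
  -- for i in range(mu): new_muts.append(mu_ct + 1); mu_ct += 1
  let inner := (PySem.List.pyRange 0 mu 1).foldl
    (fun (p : List Int × Int) _ => (p.1 ++ [p.2 + 1], p.2 + 1)) ([], st.2)
  (st.1.insert key (old_muts ++ inner.1), inner.2)  -- world[key] = old_muts + new_muts

def mutation (world : List (Int × List Int)) (mu : Int) (count : Int) : List (Int × List Int) :=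
  (((PySem.Dict.mk world).keys.foldl (mutationStepA mu) (PySem.Dict.mk world, count)).1).items

-- ===== PORT B =====
-- the body of B's 'for key in keys' loop; state = (world, pool)
def mutationStepB (mu : Int) (st : PySem.Dict Int (List Int) × List Int) (key : Int) :
    PySem.Dict Int (List Int) × List Int :=
  let chunk := PySem.List.slice st.2 none (some mu)    -- pool[:mu]
  let rest := PySem.List.slice st.2 (some mu) none     -- pool[mu:]
  (st.1.insert key (st.1.getD key [] ++ chunk), rest)  -- world[key] = world[key] + chunk

def mutation_alt (world : List (Int × List Int)) (mu : Int) (count : Int) : List (Int × List Int) :=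
  (((PySem.Dict.mk world : PySem.Dict Int (List Int)).keys.foldl (mutationStepB mu)
      (PySem.Dict.mk world,
       PySem.List.pyRange (count + 1)
         (count + mu * ((PySem.Dict.mk world : PySem.Dict Int (List Int)).keys.length : Int) + 1) 1)).1).items

-- ===== PRECONDITION & SPEC =====
def Spec_mutation (world : List (Int × List Int)) (mu : Int) (count : Int) (out : List (Int × List Int)) : Prop := out = mutation_alt world mu count
instance (world : List (Int × List Int)) (mu : Int) (count : Int) (out : List (Int × List Int)) : Decidable (Spec_mutation world mu count out) := by unfold Spec_mutation; infer_instance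

-- ===== CLAIM (what is proved, stated in full; the proofs are below) =====
def Claim_equal_mutation : Prop := ∀ (world : List (Int × List Int)) (mu : Int) (count : Int), Dom_mutation world mu count → Spec_mutation world mu count (mutation world mu count)

-- ===== LEMMAS AND PROOFS =====

-- A's inner loop builds the run c+1, …, c+len and advances the counter by len
theorem pv_inner (l : List Int) (acc : List Int) (c : Int) :
    l.foldl (fun (p : List Int × Int) _ => (p.1 ++ [p.2 + 1], p.2 + 1)) (acc, c)
      = (acc ++ PySem.List.pyRange (c + 1) (c + 1 + l.length) 1, c + l.length) := by
  induction l generalizing acc c with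
  | nil => simp [PySem.List.pyRange_one_eq_nil]
  | cons x xs ih =>
    rw [List.foldl_cons, ih, show c + 1 + 1 = c + 2 by ring]
    have hcons : PySem.List.pyRange (c + 1) (c + 1 + ((xs.length + 1 : Nat) : Int)) 1
        = (c + 1) :: PySem.List.pyRange (c + 2) (c + 2 + (xs.length : Int)) 1 := by
      rw [show (c + 1 + ((xs.length + 1 : Nat) : Int)) = c + 2 + (xs.length : Int) by
        push_cast; ring]
      rw [PySem.List.pyRange_one_cons (by omega)]
      rw [show c + 1 + 1 = c + 2 by ring]
    simp only [List.length_cons, hcons, Prod.mk.injEq]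
    exact ⟨by simp, by push_cast; ring⟩

-- A's loop body in closed form
theorem pv_stepA_eq (mu : Int) (d : PySem.Dict Int (List Int)) (c k : Int) :
    mutationStepA mu (d, c) k
      = (d.insert k (d.getD k [] ++ PySem.List.pyRange (c + 1) (c + 1 + ((mu - 0).toNat : Int)) 1),
         c + ((mu - 0).toNat : Int)) := by
  unfold mutationStepA
  rw [pv_inner]
  simp [PySem.List.length_pyRange_one]

-- taking / dropping the front of a range splits it at a + n
theorem pv_range_take (a b : Int) (n : Nat) (h : a + n ≤ b) :
    (PySem.List.pyRange a b 1).take n = PySem.List.pyRange a (a + n) 1 := by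
  rw [PySem.List.pyRange_one_append a (a + n) b (by omega) h]
  rw [List.take_append_of_le_length (by rw [PySem.List.length_pyRange_one]; omega)]
  rw [List.take_of_length_le (by rw [PySem.List.length_pyRange_one]; omega)]

theorem pv_range_drop (a b : Int) (n : Nat) (h : a + n ≤ b) :
    (PySem.List.pyRange a b 1).drop n = PySem.List.pyRange (a + n) b 1 := by
  rw [PySem.List.pyRange_one_append a (a + n) b (by omega) h]
  rw [List.drop_append_of_le_length (by rw [PySem.List.length_pyRange_one]; omega)]
  rw [List.drop_of_length_le (by rw [PySem.List.length_pyRange_one]; omega)]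
  simp

-- every slice of the empty list is empty
theorem pv_slice_nil (a? b? : Option Int) : PySem.List.slice ([] : List Int) a? b? = [] := by
  cases a? <;> cases b? <;> simp [PySem.List.slice, PySem.List.clampIdx]

-- main invariant for mu > 0: A with counter c matches B whose pool holds the next keys.length·mu IDs
theorem pv_outer_pos (mu : Int) (hmu : 0 < mu) (keys : List Int)
    (d : PySem.Dict Int (List Int)) (c : Int) :
    (keys.foldl (mutationStepA mu) (d, c)).1
      = (keys.foldl (mutationStepB mu)
          (d, PySem.List.pyRange (c + 1) (c + 1 + (keys.length : Int) * mu) 1)).1 := by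
  induction keys generalizing d c with
  | nil => simp
  | cons k ks ih =>
    have hmn : ((mu - 0).toNat : Int) = mu := by omega
    have hn0 : (0 : Int) ≤ (ks.length : Int) := Int.natCast_nonneg _
    have hcond : c + 1 + ((mu.toNat : Nat) : Int) ≤ c + 1 + ((k :: ks).length : Int) * mu := by
      have : ((mu.toNat : Nat) : Int) = mu := by omega
      rw [this, List.length_cons]
      push_cast
      nlinarith
    rw [List.foldl_cons, List.foldl_cons, pv_stepA_eq, hmn]
    have hB : mutationStepB mu (d, PySem.List.pyRange (c + 1) (c + 1 + ((k :: ks).length : Int) * mu) 1) k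
        = (d.insert k (d.getD k [] ++ PySem.List.pyRange (c + 1) (c + 1 + mu) 1),
           PySem.List.pyRange (c + mu + 1) (c + mu + 1 + (ks.length : Int) * mu) 1) := by
      unfold mutationStepB
      rw [PySem.List.slice_to _ (le_of_lt hmu), PySem.List.slice_from _ (le_of_lt hmu)]
      rw [pv_range_take _ _ mu.toNat hcond, pv_range_drop _ _ mu.toNat hcond]
      rw [show c + 1 + ((mu.toNat : Nat) : Int) = c + mu + 1 by omega]
      rw [show c + 1 + ((k :: ks).length : Int) * mu = c + mu + 1 + (ks.length : Int) * mu by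
        rw [List.length_cons]; push_cast; ring]
      rw [show c + mu + 1 = c + 1 + mu by ring]
    rw [hB]
    rw [show c + 1 + mu = c + mu + 1 by ring]
    exact ih _ _

-- for mu ≤ 0 A appends nothing and B's pool is empty throughout
theorem pv_outer_nonpos (mu : Int) (hmu : mu ≤ 0) (keys : List Int)
    (d : PySem.Dict Int (List Int)) (c : Int) :
    (keys.foldl (mutationStepA mu) (d, c)).1
      = (keys.foldl (mutationStepB mu) (d, [])).1 := by
  induction keys generalizing d c with
  | nil => simp
  | cons k ks ih =>
    rw [List.foldl_cons, List.foldl_cons, pv_stepA_eq]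
    have hB : mutationStepB mu (d, ([] : List Int)) k = (d.insert k (d.getD k [] ++ []), []) := by
      unfold mutationStepB
      rw [pv_slice_nil, pv_slice_nil]
    rw [hB]
    rw [show ((mu - 0).toNat : Int) = 0 by omega]
    rw [show PySem.List.pyRange (c + 1) (c + 1 + 0) 1 = []
      from PySem.List.pyRange_one_eq_nil (by omega)]
    simp only [add_zero]
    exact ih _ _

-- ===== VERDICT (by name: the statement is the Claim_ definition above) =====
theorem mutation_spec : Claim_equal_mutation := by
  intro world mu count _
  unfold Spec_mutation mutation mutation_alt
  rcases lt_or_ge 0 mu with hmu | hmu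
  · rw [show count + mu * (((PySem.Dict.mk world : PySem.Dict Int (List Int)).keys.length : Nat) : Int) + 1
        = count + 1 + (((PySem.Dict.mk world : PySem.Dict Int (List Int)).keys.length : Nat) : Int) * mu by ring]
    rw [pv_outer_pos mu hmu (PySem.Dict.mk world).keys (PySem.Dict.mk world) count]
  · rw [show PySem.List.pyRange (count + 1)
        (count + mu * (((PySem.Dict.mk world : PySem.Dict Int (List Int)).keys.length : Nat) : Int) + 1) 1 = []
      from PySem.List.pyRange_one_eq_nil
        (by nlinarith [Int.natCast_nonneg ((PySem.Dict.mk world : PySem.Dict Int (List Int)).keys.length)])]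
    rw [pv_outer_nonpos mu hmu (PySem.Dict.mk world).keys (PySem.Dict.mk world) count]
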